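-- pv_equiv track=rewrite | github.com/JKILLR/mynd-v3 | mynd-brain/brain/unified_brain.py | _combine_context
-- ===== SOURCE A (Python) =====
-- from typing import Optional, List, Dict, Any
--
-- def _combine_context(parts: List[tuple], request_type: str) -> str:
--     """Combine all context parts into a single document"""
--     # Order matters - most important first
--     order = ['self_awareness', 'distilled_knowledge', 'meta_learning', 'request', 'map_context', 'memories', 'neural_insights']
--
--     ordered_parts = []
--     for name in order:
--         for part_name, content in parts:
--             if part_name == name:
--                 ordered_parts.append(content)
--                 break
--
--     # Add any remaining parts
--     for part_name, content in parts:
--         if part_name not in order: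
--             ordered_parts.append(content)
--
--     separator = "\n\n---\n\n"
--     return separator.join(ordered_parts)
-- ===== SOURCE B (Python) =====
-- def _combine_context(parts, request_type):
--     """Combine all context parts into a single document (single-pass index build)"""
--     order = ['self_awareness', 'distilled_knowledge', 'meta_learning', 'request', 'map_context', 'memories', 'neural_insights']
--     first = {}
--     leftovers = []
--     for name, content in parts:
--         if name in order:
--             if name not in first:
--                 first[name] = content
--         else:
--             leftovers.append(content)
--     return "\n\n---\n\n".join([first[name] for name in order if name in first] + leftovers)
-- ===== Notes on version B (the rewrite author's own statement) =====
-- stated objective: alternative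
-- what changed: Replaces the 7 repeated scans of parts (one per ordered name, with break) by a single pass that indexes each ordered name's first content in a dict and collects leftovers, then emits dict hits in order followed by leftovers.
import Mathlib
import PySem

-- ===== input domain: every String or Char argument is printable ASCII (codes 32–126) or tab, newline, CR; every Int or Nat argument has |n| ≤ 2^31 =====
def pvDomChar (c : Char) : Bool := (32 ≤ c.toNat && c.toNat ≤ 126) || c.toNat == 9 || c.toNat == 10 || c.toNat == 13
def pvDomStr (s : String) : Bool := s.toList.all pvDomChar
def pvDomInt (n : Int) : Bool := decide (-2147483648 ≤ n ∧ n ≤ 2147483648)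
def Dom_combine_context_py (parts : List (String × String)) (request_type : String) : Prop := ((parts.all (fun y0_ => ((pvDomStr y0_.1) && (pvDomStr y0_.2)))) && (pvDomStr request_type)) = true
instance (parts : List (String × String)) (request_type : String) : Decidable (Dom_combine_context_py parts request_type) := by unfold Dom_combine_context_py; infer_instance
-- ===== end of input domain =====

-- B replaces A's seven repeated scans of `parts` (one per ordered name, with break) by a single
-- indexing pass (first-occurrence dict + leftovers list); alternative structure, same results.


-- the shared constant `order` of both Pythons
def pvOrder : List String :=
  ["self_awareness", "distilled_knowledge", "meta_learning", "request",
   "map_context", "memories", "neural_insights"]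

-- ===== PORT A =====
-- for each name in order: scan parts for the first pair with that key (the `break`), append its content
def combine_context_py (parts : List (String × String)) (request_type : String) : String :=
  let ordered_parts : List String :=
    pvOrder.foldl (fun acc name =>
      match parts.find? (fun p => p.1 == name) with
      | some p => acc ++ [p.2]
      | none => acc) []
  -- add any remaining parts (part_name not in order)
  let ordered_parts :=
    parts.foldl (fun acc p =>
      if !(pvOrder.contains p.1) then acc ++ [p.2] else acc) ordered_parts
  PySem.Str.join "\n\n---\n\n" ordered_parts

-- ===== PORT B =====
-- single pass: dict of first content per ordered name + leftovers; then emit dict hits in order, then leftovers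
def combine_context_py_alt (parts : List (String × String)) (request_type : String) : String :=
  let st : PySem.Dict String String × List String :=
    parts.foldl (fun acc p =>
      if pvOrder.contains p.1 then
        (if acc.1.contains p.1 then acc.1 else acc.1.insert p.1 p.2, acc.2)
      else
        (acc.1, acc.2 ++ [p.2])) (PySem.Dict.empty, [])
  PySem.Str.join "\n\n---\n\n" (pvOrder.filterMap (fun n => st.1.get? n) ++ st.2)

-- ===== PRECONDITION & SPEC =====
def Spec_combine_context_py (parts : List (String × String)) (request_type : String) (out : String) : Prop := out = combine_context_py_alt parts request_type
instance (parts : List (String × String)) (request_type : String) (out : String) : Decidable (Spec_combine_context_py parts request_type out) := by unfold Spec_combine_context_py; infer_instance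

-- ===== CLAIM (what is proved, stated in full; the proofs are below) =====
def Claim_equal_combine_context_py : Prop := ∀ (parts : List (String × String)) (request_type : String), Dom_combine_context_py parts request_type → Spec_combine_context_py parts request_type (combine_context_py parts request_type)

-- ===== LEMMAS AND PROOFS =====

-- B's loop step, named for the proofs
def pvStep (acc : PySem.Dict String String × List String) (p : String × String) :
    PySem.Dict String String × List String :=
  if pvOrder.contains p.1 then
    (if acc.1.contains p.1 then acc.1 else acc.1.insert p.1 p.2, acc.2)
  else
    (acc.1, acc.2 ++ [p.2])

-- B's dict after the loop answers exactly A's first-match scan (for any starting state)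
theorem pvStep_fst_get? (parts : List (String × String)) (d : PySem.Dict String String)
    (ls : List String) (name : String) :
    ((parts.foldl pvStep (d, ls)).1).get? name =
      ((d.get? name).or
        (if pvOrder.contains name then
          (parts.find? (fun p => p.1 == name)).map (·.2) else none)) := by
  induction parts generalizing d ls with
  | nil => cases h : d.get? name <;> simp [h]
  | cons p rest ih =>
    simp only [List.foldl_cons, List.find?]
    by_cases hn : p.1 = name
    · subst hn
      by_cases hc : pvOrder.contains p.1
      · have hm : p.1 ∈ pvOrder := by simpa using hc
        by_cases hd : d.contains p.1
        · have hv : ∃ v, d.get? p.1 = some v := by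
            rw [PySem.Dict.contains_eq_isSome_get?] at hd
            cases h : d.get? p.1
            · simp [h] at hd
            · exact ⟨_, rfl⟩
          obtain ⟨v, hv⟩ := hv
          simp [pvStep, hd, ih, hv, hm]
        · have hv : d.get? p.1 = none := by
            rw [PySem.Dict.contains_eq_isSome_get?] at hd
            cases h : d.get? p.1
            · rfl
            · simp [h] at hd
          simp [pvStep, hd, ih, PySem.Dict.get?_insert, hv, hm]
      · have hm : p.1 ∉ pvOrder := by simpa using hc
        simp [pvStep, ih, hm]
    · have hne : (p.1 == name) = false := by simp [hn]
      by_cases hc : pvOrder.contains p.1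
      · have hm : p.1 ∈ pvOrder := by simpa using hc
        by_cases hd : d.contains p.1
        · simp [pvStep, hm, hd, ih, hne]
        · simp [pvStep, hm, hd, ih, hne, PySem.Dict.get?_insert, Ne.symm hn]
      · have hm : p.1 ∉ pvOrder := by simpa using hc
        simp [pvStep, hm, ih, hne]

-- B's leftovers after the loop are exactly the contents of the non-ordered pairs, in order
theorem pvStep_snd (parts : List (String × String)) (d : PySem.Dict String String)
    (ls : List String) :
    (parts.foldl pvStep (d, ls)).2 =
      ls ++ (parts.filter (fun p => !(pvOrder.contains p.1))).map (·.2) := by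
  induction parts generalizing d ls with
  | nil => simp
  | cons p rest ih =>
    simp only [List.foldl_cons, List.filter]
    by_cases hc : pvOrder.contains p.1
    · have hm : p.1 ∈ pvOrder := by simpa using hc
      simp [pvStep, hm, ih]
    · have hm : p.1 ∉ pvOrder := by simpa using hc
      simp [pvStep, hm, ih]

-- A's per-name fold is a filterMap over the order list
theorem pvFoldl_match (l : List String) (g : String → Option (String × String))
    (init : List String) :
    (l.foldl (fun acc name =>
      match g name with
      | some p => acc ++ [p.2]
      | none => acc) init) = init ++ l.filterMap (fun n => (g n).map (·.2)) := by
  induction l generalizing init with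
  | nil => simp
  | cons n rest ih =>
    simp only [List.foldl_cons, List.filterMap_cons]
    cases h : g n <;> simp [h, ih]

-- ===== VERDICT (by name: the statement is the Claim_ definition above) =====
theorem combine_context_py_spec : Claim_equal_combine_context_py := by
  intro parts request_type _
  unfold Spec_combine_context_py combine_context_py combine_context_py_alt
  show PySem.Str.join _ _ = PySem.Str.join _ _
  congr 1
  rw [pvFoldl_match pvOrder (fun name => parts.find? (fun p => p.1 == name)) [],
    PySem.List.foldl_append_if, List.nil_append]
  have hfold : parts.foldl
      (fun acc p => if pvOrder.contains p.1 then
        (if acc.1.contains p.1 then acc.1 else acc.1.insert p.1 p.2, acc.2)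
      else (acc.1, acc.2 ++ [p.2])) (PySem.Dict.empty, []) =
      parts.foldl pvStep (PySem.Dict.empty, []) := rfl
  rw [hfold, pvStep_snd]
  congr 1
  apply List.filterMap_congr
  intro n hn
  rw [pvStep_fst_get? parts PySem.Dict.empty [] n]
  have hc : pvOrder.contains n = true := by simpa using hn
  rw [if_pos hc, PySem.Dict.get?_empty, Option.none_or]
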